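-- pv_equiv track=rewrite | github.com/QuickSolverDab/Mixmatch_pytorch | submain.py | interleave_offsets
-- ===== SOURCE A (Python) =====
-- def interleave_offsets(batch, K):
--     groups = [batch // K] * K
--     for x in range(batch - sum(groups)):
--         groups[-x - 1] += 1
--     offsets = [0]
--     for g in groups:
--         offsets.append(offsets[-1] + g)
--     assert offsets[-1] == batch
--     return offsets
-- ===== SOURCE B (Python) =====
-- def interleave_offsets(batch, K):
--     base, r = divmod(batch, K)
--     offsets = [i * base + max(0, i - (K - r)) for i in range(K + 1)]
--     assert offsets[-1] == batch
--     return offsets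
-- ===== Notes on version B (the rewrite author's own statement) =====
-- stated objective: simpler
-- what changed: B replaces A's two loops (remainder distribution over the group array and a prefix-sum accumulation) with a single comprehension computing each boundary independently by the closed form offsets[i] = i*(batch//K) + max(0, i-(K - batch%K)).
-- outside the precondition, e.g. on interleave_offsets(0, -2): A returns [0], B raises IndexError
import Mathlib
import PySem

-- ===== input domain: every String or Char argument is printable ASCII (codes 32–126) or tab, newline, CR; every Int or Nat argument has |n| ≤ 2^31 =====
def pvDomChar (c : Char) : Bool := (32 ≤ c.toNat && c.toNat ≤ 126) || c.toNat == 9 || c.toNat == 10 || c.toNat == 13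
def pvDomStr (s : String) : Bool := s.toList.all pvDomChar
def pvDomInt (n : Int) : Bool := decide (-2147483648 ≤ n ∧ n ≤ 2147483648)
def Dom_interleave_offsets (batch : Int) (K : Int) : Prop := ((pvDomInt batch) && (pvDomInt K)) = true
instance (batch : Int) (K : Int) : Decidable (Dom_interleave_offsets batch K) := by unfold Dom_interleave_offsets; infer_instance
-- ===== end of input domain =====

-- B computes each offset by a closed-form per-index formula instead of A's remainder-distribution
-- loop followed by a prefix-sum loop (objective: simpler; same O(K) cost).

-- ===== PORT A =====
def interleave_offsets (batch : Int) (K : Int) : List Int :=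
  -- groups = [batch // K] * K   (Python list repetition: negative K gives [])
  let groups : List Int := List.replicate K.toNat (PySem.Int.floordiv batch K)
  -- for x in range(batch - sum(groups)): groups[-x - 1] += 1
  -- (index -x-1 is len-1-x; exact here since Pre_ guarantees 0 ≤ x < len)
  let groups := (PySem.List.pyRange 0 (batch - groups.sum) 1).foldl
    (fun gs x =>
      gs.set (gs.length - 1 - x.toNat) (gs.getD (gs.length - 1 - x.toNat) 0 + 1)) groups
  -- offsets = [0]; for g in groups: offsets.append(offsets[-1] + g)
  -- (offsets[-1] via getLastD 0: exact, offsets is never empty)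
  let offsets := groups.foldl (fun offs g => offs ++ [offs.getLastD 0 + g]) [0]
  -- assert offsets[-1] == batch  (holds on Pre_; on failure Python raises, excluded by Pre_)
  offsets

-- ===== PORT B =====
def interleave_offsets_alt (batch : Int) (K : Int) : List Int :=
  -- base, r = divmod(batch, K)
  let base := PySem.Int.floordiv batch K
  let r := PySem.Int.mod batch K
  -- offsets = [i*base + max(0, i-(K-r)) for i in range(K+1)]
  let offsets := (PySem.List.pyRange 0 (K + 1) 1).map (fun i => i * base + max 0 (i - (K - r)))
  -- assert offsets[-1] == batch  (holds on Pre_)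
  offsets

-- ===== PRECONDITION & SPEC =====
-- Pre_ excludes K ≤ 0, where A raises (ZeroDivisionError for K = 0; IndexError or a failing
-- assert for K < 0) except the accidental corner batch = 0 ∧ K < 0, on which A happens to
-- return [0] while B's own algorithm raises IndexError on its empty offsets list.
def Pre_interleave_offsets (batch : Int) (K : Int) : Prop := 0 < K
instance (batch : Int) (K : Int) : Decidable (Pre_interleave_offsets batch K) := by unfold Pre_interleave_offsets; infer_instance
def pvWitness_interleave_offsets : Int × Int := (7, 3)

def Spec_interleave_offsets (batch : Int) (K : Int) (out : List Int) : Prop := out = interleave_offsets_alt batch K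
instance (batch : Int) (K : Int) (out : List Int) : Decidable (Spec_interleave_offsets batch K out) := by unfold Spec_interleave_offsets; infer_instance

-- ===== CLAIM (what is proved, stated in full; the proofs are below) =====
def Claim_equal_interleave_offsets : Prop := ∀ (batch : Int) (K : Int), Dom_interleave_offsets batch K → Pre_interleave_offsets batch K → Spec_interleave_offsets batch K (interleave_offsets batch K)

-- ===== LEMMAS AND PROOFS =====

-- after the increment loop the last m of the n groups hold b+1
theorem loop_replicate (m : Nat) : ∀ (n : Nat) (b : Int), m ≤ n →
    (PySem.List.pyRange 0 (m : Int) 1).foldl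
      (fun gs x =>
        gs.set (gs.length - 1 - x.toNat) (gs.getD (gs.length - 1 - x.toNat) 0 + 1))
      (List.replicate n b)
    = List.replicate (n - m) b ++ List.replicate m (b + 1) := by
  induction m with
  | zero => intro n b _; simp [PySem.List.pyRange_one_eq_nil]
  | succ m ih =>
    intro n b hmn
    have h1 : ((m + 1 : Nat) : Int) = (m : Int) + 1 := by push_cast; ring
    rw [h1, PySem.List.pyRange_one_succ_right (by positivity), List.foldl_append,
      ih n b (by omega)]
    simp only [List.foldl_cons, List.foldl_nil]
    have hlen : (List.replicate (n - m) b ++ List.replicate m (b + 1)).length = n := by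
      simp; omega
    have htoNat : ((m : Int)).toNat = m := by omega
    rw [hlen, htoNat]
    have hidx : n - 1 - m < n - m := by omega
    have hgetD : (List.replicate (n - m) b ++ List.replicate m (b + 1)).getD (n - 1 - m) 0 = b := by
      rw [List.getD_append _ _ _ _ (by simp; omega)]
      simp [List.getD_eq_getElem?_getD, (by omega : n - 1 - m < n - m)]
    rw [hgetD]
    rw [List.set_append_left _ _ (by simp; omega)]
    have hrep : List.replicate (n - m) b = List.replicate (n - 1 - m) b ++ [b] := by
      have : n - m = (n - 1 - m) + 1 := by omega
      rw [this, List.replicate_succ']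
    rw [hrep]
    rw [List.set_append]
    simp only [List.length_replicate, lt_irrefl, if_false, Nat.sub_self, List.set_cons_zero,
      List.append_assoc, List.singleton_append]
    rw [← List.replicate_succ, show n - (m + 1) = n - 1 - m by omega]

-- prefix-sum loop over a constant block, in closed form
theorem fold_replicate (p : Nat) : ∀ (c : Int) (offs : List Int),
    (List.replicate p c).foldl (fun offs g => offs ++ [offs.getLastD 0 + g]) offs
    = offs ++ (List.range p).map (fun j => offs.getLastD 0 + (((j : Nat) + 1 : Nat) : Int) * c) := by
  induction p with
  | zero => intro c offs; simp
  | succ p ih =>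
    intro c offs
    rw [List.replicate_succ, List.foldl_cons, ih, List.getLastD_concat,
      List.range_succ_eq_map, List.map_cons, List.map_map, List.append_assoc,
      List.singleton_append]
    congr 1
    rw [List.cons_eq_cons]
    constructor
    · push_cast; ring
    · apply List.map_congr_left
      intro j _
      simp only [Function.comp]
      push_cast; ring

-- [0] followed by the ramp of partial sums of p copies of b is a linear ramp
theorem ramp_eq (p : Nat) (b : Int) :
    (0 : Int) :: (List.range p).map (fun j => (0 : Int) + (((j : Nat) + 1 : Nat) : Int) * b)
    = (List.range (p + 1)).map (fun k => ((k : Nat) : Int) * b) := by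
  rw [List.range_succ_eq_map, List.map_cons, List.map_map]
  simp [Function.comp]

-- last element of a mapped (p+1)-range
theorem last_map_range (p : Nat) (g : Nat → Int) :
    ((List.range (p + 1)).map g).getLastD 0 = g p := by
  rw [List.range_succ, List.map_append, List.map_singleton, List.getLastD_concat]

-- gluing the two ramps gives the closed form with max
theorem glue_ramps (p m : Nat) (b : Int) :
    (List.range (p + 1)).map (fun k => ((k : Nat) : Int) * b)
      ++ (List.range m).map (fun j => ((p : Nat) : Int) * b + (((j : Nat) + 1 : Nat) : Int) * (b + 1))
    = (List.range (p + 1 + m)).map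
        (fun k => ((k : Nat) : Int) * b + max 0 (((k : Nat) : Int) - ((p : Nat) : Int))) := by
  conv_rhs => rw [List.range_add, List.map_append, List.map_map]
  congr 1
  · apply List.map_congr_left
    intro k hk
    rw [List.mem_range] at hk
    have : max 0 (((k : Nat) : Int) - ((p : Nat) : Int)) = 0 := by
      rw [max_eq_left]; omega
    rw [this, add_zero]
  · apply List.map_congr_left
    intro j _
    simp only [Function.comp]
    push_cast
    rw [show (p : Int) + 1 + (j : Int) - (p : Int) = (j : Int) + 1 by ring,
      max_eq_right (by omega : (0 : Int) ≤ (j : Int) + 1)]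
    ring

theorem interleave_offsets_spec : Claim_equal_interleave_offsets := by
  intro batch K _ hK
  unfold Spec_interleave_offsets interleave_offsets interleave_offsets_alt
  dsimp only
  set b := PySem.Int.floordiv batch K with hb
  set r := PySem.Int.mod batch K with hr
  have hr0 : 0 ≤ r := PySem.Int.mod_nonneg batch hK
  have hrK : r < K := PySem.Int.mod_lt batch hK
  have hKn : ((K.toNat : Nat) : Int) = K := Int.toNat_of_nonneg (le_of_lt hK)
  have hmn : ((r.toNat : Nat) : Int) = r := Int.toNat_of_nonneg hr0
  have hbatch : b * K + r = batch := PySem.Int.floordiv_mul_add_mod batch K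
  have hle : r.toNat ≤ K.toNat := by omega
  -- the remainder of the division is what the increment loop distributes
  have hrem : batch - (List.replicate K.toNat b).sum = r := by
    rw [List.sum_replicate, nsmul_eq_mul, hKn]
    nlinarith [hbatch]
  rw [hrem, ← hmn, loop_replicate r.toNat K.toNat b hle, List.foldl_append,
    fold_replicate (K.toNat - r.toNat) b [0],
    fold_replicate r.toNat (b + 1)]
  simp only [show ([0] : List Int).getLastD 0 = 0 from rfl, List.singleton_append]
  rw [ramp_eq, last_map_range, glue_ramps]
  -- B side: range(K+1) as a Nat range
  rw [PySem.List.pyRange_one, List.map_map]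
  have hKn1 : (K + 1 - 0).toNat = (K.toNat - r.toNat) + 1 + r.toNat := by omega
  rw [hKn1]
  apply List.map_congr_left
  intro k _
  simp only [Function.comp]
  have hp : (((K.toNat - r.toNat : Nat)) : Int) = K - ((r.toNat : Nat) : Int) := by
    push_cast [hle]; omega
  rw [hp]
  ring_nf
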